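-- pv_equiv track=rewrite | github.com/hackingmath/Advent_of_Code_2021 | Day15.py | duplicate_grid
-- ===== SOURCE A (Python) =====
-- def expand_row(row,addn):
--     output = list()
--     for n in row:
--         if n + addn >= 10:
--             output.append((n + addn)%9)
--         else:
--             output.append(n + addn)
--     return output
--
-- def duplicate_grid(g):
--     """Tiles grid 5 times to the right
--     and 5 times down."""
--     outg = list()
--     for row in g:
--         newrow = list()
--         for i in range(5):
--             newrow += expand_row(row,i)
--         outg.append(newrow)
--     newoutg = list()
--     for i in range(5):
--         for row in outg:
--             newoutg.append(expand_row(row,i))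
--     return newoutg
-- ===== SOURCE B (Python) =====
-- def duplicate_grid(g):
--     """Tiles grid 5 times to the right
--     and 5 times down."""
--     def bump(x, a):
--         return (x + a) % 9 if x + a >= 10 else x + a
--     out = []
--     for i in range(5):
--         for row in g:
--             out.append([bump(bump(n, j), i) for j in range(5) for n in row])
--     return out
-- ===== Notes on version B (the rewrite author's own statement) =====
-- stated objective: simpler
-- what changed: B drops A's two-phase build (widen all rows into an intermediate full-width grid, then tile it down): a single set of nested loops over vertical tile, row, horizontal tile and cell emits each output row directly via the double-wrapped increment bump(bump(n,j),i), eliminating the intermediate grid and the expand_row helper passes.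
import Mathlib
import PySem

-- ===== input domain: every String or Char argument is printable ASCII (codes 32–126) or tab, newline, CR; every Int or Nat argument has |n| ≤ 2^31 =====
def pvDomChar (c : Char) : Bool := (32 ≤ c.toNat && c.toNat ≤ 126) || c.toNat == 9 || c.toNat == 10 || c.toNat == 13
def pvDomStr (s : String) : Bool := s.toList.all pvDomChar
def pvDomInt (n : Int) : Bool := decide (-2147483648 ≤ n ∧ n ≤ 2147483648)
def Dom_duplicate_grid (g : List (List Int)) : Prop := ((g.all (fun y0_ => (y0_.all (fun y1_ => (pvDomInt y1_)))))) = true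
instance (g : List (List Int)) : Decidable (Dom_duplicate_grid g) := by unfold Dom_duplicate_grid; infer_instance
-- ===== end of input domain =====

-- ===== PORT A =====
-- Python A: expand_row builds the shifted row by appending; duplicate_grid first
-- widens each row 5x (outg), then tiles outg 5x down.  Transliterated fold for fold.
-- B collapses the two-phase build into one set of nested loops (same return value).
def expandRow (row : List Int) (addn : Int) : List Int :=
  row.foldl (fun output n =>
    output ++ [if n + addn ≥ 10 then PySem.Int.mod (n + addn) 9 else n + addn]) []

def duplicate_grid (g : List (List Int)) : List (List Int) :=
  let outg := g.foldl (fun outg row =>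
    let newrow := (PySem.List.pyRange 0 5 1).foldl
      (fun newrow i => newrow ++ expandRow row i) []
    outg ++ [newrow]) []
  (PySem.List.pyRange 0 5 1).foldl (fun newoutg i =>
    outg.foldl (fun newoutg row => newoutg ++ [expandRow row i]) newoutg) []

-- ===== PORT B =====
def bump (x a : Int) : Int :=
  if x + a ≥ 10 then PySem.Int.mod (x + a) 9 else x + a

def duplicate_grid_alt (g : List (List Int)) : List (List Int) :=
  (PySem.List.pyRange 0 5 1).foldl (fun out i =>
    g.foldl (fun out row =>
      out ++ [(PySem.List.pyRange 0 5 1).flatMap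
        (fun j => row.map (fun n => bump (bump n j) i))]) out) []

-- ===== PRECONDITION & SPEC =====
def Spec_duplicate_grid (g : List (List Int)) (out : List (List Int)) : Prop := out = duplicate_grid_alt g
instance (g : List (List Int)) (out : List (List Int)) : Decidable (Spec_duplicate_grid g out) := by unfold Spec_duplicate_grid; infer_instance

-- ===== CLAIM (what is proved, stated in full; the proofs are below) =====
def Claim_equal_duplicate_grid : Prop := ∀ (g : List (List Int)), Dom_duplicate_grid g → Spec_duplicate_grid g (duplicate_grid g)

-- ===== LEMMAS AND PROOFS =====
theorem expandRow_eq_map (row : List Int) (a : Int) :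
    expandRow row a = row.map (fun n => bump n a) := by
  simpa [expandRow, bump] using
    PySem.List.foldl_append_singleton_eq_map (fun n => bump n a) row []

-- A's widened row, shifted once more by i, equals the flatMap row B builds directly.
theorem wide_row_eq (row : List Int) (i : Int) :
    expandRow ((PySem.List.pyRange 0 5 1).foldl
        (fun newrow j => newrow ++ expandRow row j) []) i =
      (PySem.List.pyRange 0 5 1).flatMap
        (fun j => row.map (fun n => bump (bump n j) i)) := by
  rw [PySem.List.foldl_append_eq_flatMap]
  simp [expandRow_eq_map, List.map_flatMap, Function.comp_def]

theorem duplicate_grid_eq_alt (g : List (List Int)) :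
    duplicate_grid g = duplicate_grid_alt g := by
  unfold duplicate_grid duplicate_grid_alt
  have houtg : g.foldl (fun outg row =>
      let newrow := (PySem.List.pyRange 0 5 1).foldl
        (fun newrow i => newrow ++ expandRow row i) []
      outg ++ [newrow]) [] =
      g.map (fun row => (PySem.List.pyRange 0 5 1).foldl
        (fun newrow i => newrow ++ expandRow row i) []) := by
    simpa using PySem.List.foldl_append_singleton_eq_map
      (fun row => (PySem.List.pyRange 0 5 1).foldl
        (fun newrow i => newrow ++ expandRow row i) []) g []
  rw [houtg]
  have hfun : (fun (newoutg : List (List Int)) (i : Int) =>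
      (g.map (fun row => (PySem.List.pyRange 0 5 1).foldl
        (fun newrow i => newrow ++ expandRow row i) [])).foldl
        (fun newoutg row => newoutg ++ [expandRow row i]) newoutg)
    = (fun (out : List (List Int)) (i : Int) =>
      g.foldl (fun out row =>
        out ++ [(PySem.List.pyRange 0 5 1).flatMap
          (fun j => row.map (fun n => bump (bump n j) i))]) out) := by
    funext acc i
    rw [List.foldl_map, PySem.List.foldl_append_singleton_eq_map,
        PySem.List.foldl_append_singleton_eq_map]
    congr 1
    exact List.map_congr_left (fun row _ => wide_row_eq row i)
  simp only [hfun]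

-- ===== VERDICT (by name: the statement is the Claim_ definition above) =====
theorem duplicate_grid_spec : Claim_equal_duplicate_grid := by
  intro g _
  exact duplicate_grid_eq_alt g
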